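-- pv_equiv track=rewrite | github.com/MrBrantCode/unitest_baseline | mut_generate/mist_train_cf/cf_22833/solution.py | find_highest_peak
-- ===== SOURCE A (Python) =====
-- def find_highest_peak(arr):
--     n = len(arr)
--     peaks = []
--
--     # Finding all the peaks in the array
--     for i in range(1, n-1):
--         if arr[i] > arr[i-1] and arr[i] > arr[i+1]:
--             peaks.append(i)
--
--     # Checking if the peaks have at least two valleys on either side
--     for peak in peaks:
--         left_valleys = 0
--         right_valleys = 0
--
--         # Counting the number of valleys on the left side of the peak
--         for i in range(peak-1, 0, -1):
--             if arr[i] < arr[i-1]: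
--                 left_valleys += 1
--             else:
--                 break
--
--         # Counting the number of valleys on the right side of the peak
--         for i in range(peak+1, n-1):
--             if arr[i] < arr[i+1]:
--                 right_valleys += 1
--             else:
--                 break
--
--         # Checking if the peak has at least two valleys on both sides
--         if left_valleys >= 2 and right_valleys >= 2:
--             return peak
--
--     return -1
-- ===== SOURCE B (Python) =====
-- def find_highest_peak(arr):
--     n = len(arr)
--     # ldesc[i]: length of the consecutive run arr[i] < arr[i-1], arr[i-1] < arr[i-2], ...
--     ldesc = [0] * n
--     for i in range(1, n):
--         ldesc[i] = ldesc[i - 1] + 1 if arr[i] < arr[i - 1] else 0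
--     # rrise[i]: length of the consecutive run arr[i] < arr[i+1], arr[i+1] < arr[i+2], ...
--     rrise = [0] * n
--     for i in range(n - 2, -1, -1):
--         rrise[i] = rrise[i + 1] + 1 if arr[i] < arr[i + 1] else 0
--     # first strict local maximum with at least two descending steps on both sides
--     for p in range(1, n - 1):
--         if arr[p] > arr[p - 1] and arr[p] > arr[p + 1] and ldesc[p - 1] >= 2 and rrise[p + 1] >= 2:
--             return p
--     return -1
-- ===== Notes on version B (the rewrite author's own statement) =====
-- stated objective: alternative
-- what changed: Replaces A's two-phase peak collection plus per-peak leftward/rightward break-out counting loops by two run-length table passes (ldesc/rrise) and a single scan returning the first qualifying local maximum; it trades A's worst-case re-scanning for two fixed precomputation passes.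
import Mathlib
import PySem

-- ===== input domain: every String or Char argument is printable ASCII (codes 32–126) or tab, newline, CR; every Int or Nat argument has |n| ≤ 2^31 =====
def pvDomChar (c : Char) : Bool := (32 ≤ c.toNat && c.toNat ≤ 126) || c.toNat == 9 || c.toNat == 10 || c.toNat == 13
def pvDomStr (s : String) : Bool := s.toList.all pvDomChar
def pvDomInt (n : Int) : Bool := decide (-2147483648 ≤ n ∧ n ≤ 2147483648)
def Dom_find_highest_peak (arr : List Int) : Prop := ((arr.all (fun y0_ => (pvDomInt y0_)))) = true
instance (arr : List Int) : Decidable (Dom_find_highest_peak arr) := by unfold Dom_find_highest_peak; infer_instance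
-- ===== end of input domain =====

-- B replaces A's per-peak backward/forward counting loops by two run-length table passes
-- (ldesc/rrise) plus one scan for the first qualifying local maximum (objective: alternative).

-- arr[i] for an index known to be in range (both Pythons only index in range)
def pvGet (arr : List Int) (i : Int) : Int := PySem.List.pyGetD arr i 0

-- ===== PORT A =====
-- 'for i in range(peak-1, 0, -1): if arr[i] < arr[i-1]: left_valleys += 1 else: break'
-- (the Nat fuel only makes the countdown loop structurally total: it equals the trip count i.toNat)
def pvALeftFuel (arr : List Int) : Nat → Int → Int → Int
  | 0, _, acc => acc
  | fuel + 1, i, acc =>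
      if 1 ≤ i then
        if pvGet arr i < pvGet arr (i - 1) then pvALeftFuel arr fuel (i - 1) (acc + 1) else acc
      else acc

def pvALeft (arr : List Int) (i acc : Int) : Int := pvALeftFuel arr i.toNat i acc

-- 'for i in range(peak+1, n-1): if arr[i] < arr[i+1]: right_valleys += 1 else: break'
-- (fuel = remaining trip count (n-1-i).toNat, again only a totality guard)
def pvARightFuel (arr : List Int) (n : Int) : Nat → Int → Int → Int
  | 0, _, acc => acc
  | fuel + 1, i, acc =>
      if i ≤ n - 2 then
        if pvGet arr i < pvGet arr (i + 1) then pvARightFuel arr n fuel (i + 1) (acc + 1) else acc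
      else acc

def pvARight (arr : List Int) (n i acc : Int) : Int := pvARightFuel arr n (n - 1 - i).toNat i acc

-- 'for peak in peaks: … if left_valleys >= 2 and right_valleys >= 2: return peak'
def pvAScan (arr : List Int) (n : Int) : List Int → Int
  | [] => -1
  | p :: rest =>
      if pvALeft arr (p - 1) 0 ≥ 2 ∧ pvARight arr n (p + 1) 0 ≥ 2 then p
      else pvAScan arr n rest

def find_highest_peak (arr : List Int) : Int :=
  let n : Int := arr.length
  let peaks := (PySem.List.pyRange 1 (n - 1) 1).foldl
    (fun acc i =>
      if pvGet arr i > pvGet arr (i - 1) ∧ pvGet arr i > pvGet arr (i + 1)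
      then acc ++ [i] else acc) []
  pvAScan arr n peaks

-- ===== PORT B =====
-- forward pass: ldesc[i] = ldesc[i-1] + 1 if arr[i] < arr[i-1] else 0 (built reversed, then reversed)
def pvLdesc (arr : List Int) : List Int :=
  if (arr.length : Int) = 0 then []
  else ((PySem.List.pyRange 1 (arr.length : Int) 1).foldl
    (fun st i => (if pvGet arr i < pvGet arr (i - 1) then st.headD 0 + 1 else 0) :: st) [0]).reverse

-- backward pass: rrise[i] = rrise[i+1] + 1 if arr[i] < arr[i+1] else 0 (built by prepending)
def pvRrise (arr : List Int) : List Int :=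
  if (arr.length : Int) = 0 then []
  else (PySem.List.pyRange ((arr.length : Int) - 2) (-1) (-1)).foldl
    (fun st i => (if pvGet arr i < pvGet arr (i + 1) then st.headD 0 + 1 else 0) :: st) [0]

-- 'for p in range(1, n-1): if arr[p] > arr[p-1] and arr[p] > arr[p+1] and ldesc[p-1] >= 2 and rrise[p+1] >= 2: return p'
def pvBScan (arr ld rr : List Int) : List Int → Int
  | [] => -1
  | p :: rest =>
      if pvGet arr p > pvGet arr (p - 1) ∧ pvGet arr p > pvGet arr (p + 1)
         ∧ pvGet ld (p - 1) ≥ 2 ∧ pvGet rr (p + 1) ≥ 2 then p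
      else pvBScan arr ld rr rest

def find_highest_peak_alt (arr : List Int) : Int :=
  let n : Int := arr.length
  pvBScan arr (pvLdesc arr) (pvRrise arr) (PySem.List.pyRange 1 (n - 1) 1)

-- ===== PRECONDITION & SPEC =====
def Spec_find_highest_peak (arr : List Int) (out : Int) : Prop := out = find_highest_peak_alt arr
instance (arr : List Int) (out : Int) : Decidable (Spec_find_highest_peak arr out) := by unfold Spec_find_highest_peak; infer_instance

-- ===== CLAIM (what is proved, stated in full; the proofs are below) =====
def Claim_equal_find_highest_peak : Prop := ∀ (arr : List Int), Dom_find_highest_peak arr → Spec_find_highest_peak arr (find_highest_peak arr)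

-- ===== LEMMAS AND PROOFS =====

theorem pvALeft_eq (arr : List Int) (i acc : Int) :
    pvALeft arr i acc
      = if 1 ≤ i then
          (if pvGet arr i < pvGet arr (i - 1) then pvALeft arr (i - 1) (acc + 1) else acc)
        else acc := by
  unfold pvALeft
  by_cases h : 1 ≤ i
  · rw [show i.toNat = (i - 1).toNat + 1 by omega]
    simp only [pvALeftFuel, if_pos h]
  · rw [show i.toNat = 0 by omega]
    simp only [pvALeftFuel, if_neg h]

theorem pvARight_eq (arr : List Int) (n i acc : Int) :
    pvARight arr n i acc
      = if i ≤ n - 2 then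
          (if pvGet arr i < pvGet arr (i + 1) then pvARight arr n (i + 1) (acc + 1) else acc)
        else acc := by
  unfold pvARight
  by_cases h : i ≤ n - 2
  · rw [show (n - 1 - i).toNat = (n - 1 - (i + 1)).toNat + 1 by omega]
    simp only [pvARightFuel, if_pos h]
  · rw [show (n - 1 - i).toNat = 0 by omega]
    simp only [pvARightFuel, if_neg h]

theorem pvALeft_acc (arr : List Int) (i acc : Int) :
    pvALeft arr i acc = acc + pvALeft arr i 0 := by
  induction hk : i.toNat using Nat.strong_induction_on generalizing i acc with
  | _ k ih =>
    rw [pvALeft_eq]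
    conv_rhs => rw [pvALeft_eq]
    split_ifs with h1 h2
    · rw [ih (i - 1).toNat (by omega) (i - 1) (acc + 1) rfl,
        ih (i - 1).toNat (by omega) (i - 1) (0 + 1) rfl]
      ring
    · ring
    · ring

theorem pvARight_acc (arr : List Int) (n i acc : Int) :
    pvARight arr n i acc = acc + pvARight arr n i 0 := by
  induction hk : (n - 1 - i).toNat using Nat.strong_induction_on generalizing i acc with
  | _ k ih =>
    rw [pvARight_eq]
    conv_rhs => rw [pvARight_eq]
    split_ifs with h1 h2
    · rw [ih (n - 1 - (i + 1)).toNat (by omega) (i + 1) (acc + 1) rfl,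
        ih (n - 1 - (i + 1)).toNat (by omega) (i + 1) (0 + 1) rfl]
      ring
    · ring
    · ring

theorem pvALeft_step (arr : List Int) (j : Int) (h : 1 ≤ j) :
    pvALeft arr j 0 = if pvGet arr j < pvGet arr (j - 1) then pvALeft arr (j - 1) 0 + 1 else 0 := by
  rw [pvALeft_eq, if_pos h]
  split_ifs with h2
  · rw [pvALeft_acc]; ring
  · rfl

theorem pvARight_step (arr : List Int) (n j : Int) (h : j ≤ n - 2) :
    pvARight arr n j 0 = if pvGet arr j < pvGet arr (j + 1) then pvARight arr n (j + 1) 0 + 1 else 0 := by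
  rw [pvARight_eq, if_pos h]
  split_ifs with h2
  · rw [pvARight_acc]; ring
  · rfl

theorem pvARight_last (arr : List Int) (n j : Int) (h : n - 2 < j) :
    pvARight arr n j 0 = 0 := by
  rw [pvARight_eq, if_neg (show ¬(j ≤ n - 2) by omega)]

theorem head_rev_map_range (g : Int → Int) (m : Nat) (hm : 1 ≤ m) :
    (((List.range m).map (fun (j : Nat) => g (j : Int))).reverse).headD 0 = g ((m : Int) - 1) := by
  obtain ⟨m', rfl⟩ : ∃ m', m = m' + 1 := ⟨m - 1, by omega⟩
  rw [List.range_succ]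
  simp only [List.map_append, List.reverse_append, List.map_cons, List.map_nil,
    List.reverse_cons, List.reverse_nil, List.nil_append, List.cons_append, List.headD_cons]
  congr 1
  push_cast
  ring

theorem ldesc_fold (arr : List Int) (k : Nat) (hk : 1 ≤ k) :
    (PySem.List.pyRange 1 (k : Int) 1).foldl
      (fun st i => (if pvGet arr i < pvGet arr (i - 1) then st.headD 0 + 1 else 0) :: st) [0]
      = ((List.range k).map (fun (j : Nat) => pvALeft arr (j : Int) 0)).reverse := by
  induction k with
  | zero => omega
  | succ m ih =>
    by_cases hm : 1 ≤ m
    · rw [show ((m + 1 : Nat) : Int) = (m : Int) + 1 by push_cast; ring,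
        PySem.List.pyRange_one_succ_right (by omega), List.foldl_append, ih hm,
        List.foldl_cons, List.foldl_nil]
      simp only [head_rev_map_range (fun t => pvALeft arr t 0) m hm]
      rw [← pvALeft_step arr (m : Int) (by omega), List.range_succ]
      simp
    · obtain rfl : m = 0 := by omega
      rw [show ((0 + 1 : Nat) : Int) = 1 by norm_num, PySem.List.pyRange_one_eq_nil (by omega),
        List.foldl_nil, List.range_one]
      simp only [List.map_cons, List.map_nil, List.reverse_cons, List.reverse_nil, List.nil_append]
      rw [pvALeft_eq, if_neg (show ¬((1:Int) ≤ ((0:Nat):Int)) by omega)]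

theorem pvLdesc_eq (arr : List Int) :
    pvLdesc arr = (List.range arr.length).map (fun (j : Nat) => pvALeft arr (j : Int) 0) := by
  unfold pvLdesc
  by_cases h0 : (arr.length : Int) = 0
  · rw [if_pos h0, show arr.length = 0 by omega]
    simp
  · rw [if_neg h0, ldesc_fold arr arr.length (by omega), List.reverse_reverse]

theorem rrise_fold (arr : List Int) (a : Int) (ha : -1 ≤ a) (ha2 : a ≤ (arr.length : Int) - 2) :
    (PySem.List.pyRange a (-1) (-1)).foldl
      (fun st i => (if pvGet arr i < pvGet arr (i + 1) then st.headD 0 + 1 else 0) :: st)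
      ((PySem.List.pyRange (a + 1) (arr.length : Int) 1).map (fun t => pvARight arr (arr.length : Int) t 0))
      = (PySem.List.pyRange 0 (arr.length : Int) 1).map (fun t => pvARight arr (arr.length : Int) t 0) := by
  induction hk : (a + 1).toNat using Nat.strong_induction_on generalizing a with
  | _ k ih =>
    by_cases hneg : a < 0
    · obtain rfl : a = -1 := by omega
      rw [PySem.List.pyRange_neg_one_eq_nil (by omega), List.foldl_nil]
      norm_num
    · rw [PySem.List.pyRange_neg_one_cons (by omega), List.foldl_cons]
      have hstate : ((PySem.List.pyRange (a + 1) (arr.length : Int) 1).map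
            (fun t => pvARight arr (arr.length : Int) t 0)).headD 0
          = pvARight arr (arr.length : Int) (a + 1) 0 := by
        rw [PySem.List.pyRange_one_cons (by omega), List.map_cons, List.headD_cons]
      have hnew : ((if pvGet arr a < pvGet arr (a + 1)
              then ((PySem.List.pyRange (a + 1) (arr.length : Int) 1).map
                (fun t => pvARight arr (arr.length : Int) t 0)).headD 0 + 1 else 0)
            :: (PySem.List.pyRange (a + 1) (arr.length : Int) 1).map
                (fun t => pvARight arr (arr.length : Int) t 0))
          = (PySem.List.pyRange a (arr.length : Int) 1).map
              (fun t => pvARight arr (arr.length : Int) t 0) := by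
        rw [hstate, PySem.List.pyRange_one_cons (a := a) (by omega), List.map_cons]
        congr 1
        rw [pvARight_step arr _ a (by omega)]
      rw [hnew]
      have h2 := ih a.toNat (by omega) (a - 1) (by omega) (by omega) (by omega)
      rw [show a - 1 + 1 = a by ring] at h2
      exact h2

theorem pvRrise_eq (arr : List Int) :
    pvRrise arr = (List.range arr.length).map (fun (j : Nat) => pvARight arr (arr.length : Int) (j : Int) 0) := by
  unfold pvRrise
  by_cases h0 : (arr.length : Int) = 0
  · rw [if_pos h0, show arr.length = 0 by omega]
    simp
  · rw [if_neg h0]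
    have hr : PySem.List.pyRange ((arr.length : Int) - 2 + 1) (arr.length : Int) 1
        = [(arr.length : Int) - 2 + 1] := by
      have h1 := PySem.List.pyRange_one_singleton ((arr.length : Int) - 2 + 1)
      rw [show (arr.length : Int) - 2 + 1 + 1 = (arr.length : Int) by ring] at h1
      exact h1
    have hinit : ((PySem.List.pyRange ((arr.length : Int) - 2 + 1) (arr.length : Int) 1).map
        (fun t => pvARight arr (arr.length : Int) t 0)) = [0] := by
      rw [hr, List.map_singleton, pvARight_last arr _ _ (by omega)]
    rw [← hinit, rrise_fold arr ((arr.length : Int) - 2) (by omega) (by omega),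
      PySem.List.pyRange_zero_natCast, List.map_map]
    simp [Function.comp]

theorem pvGet_map_range (f : Int → Int) (n : Nat) (i : Int) (h0 : 0 ≤ i) (h1 : i < (n : Int)) :
    pvGet ((List.range n).map (fun (j : Nat) => f (j : Int))) i = f i := by
  unfold pvGet
  rw [PySem.List.pyGetD_eq_getElem _ 0 h0 (by simpa using h1)]
  simp only [List.getElem_map, List.getElem_range]
  congr 1
  omega

theorem pvScan_eq (arr : List Int) (l : List Int)
    (hb : ∀ p ∈ l, 1 ≤ p ∧ p < (arr.length : Int) - 1) :
    pvBScan arr (pvLdesc arr) (pvRrise arr) l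
      = pvAScan arr arr.length
          (l.filter (fun p => decide (pvGet arr p > pvGet arr (p - 1) ∧ pvGet arr p > pvGet arr (p + 1)))) := by
  induction l with
  | nil => simp [pvBScan, pvAScan]
  | cons p rest ih =>
    have hp := hb p (by simp)
    have hrest := fun q hq => hb q (List.mem_cons_of_mem _ hq)
    have hld : pvGet (pvLdesc arr) (p - 1) = pvALeft arr (p - 1) 0 := by
      rw [pvLdesc_eq]
      exact pvGet_map_range (fun t => pvALeft arr t 0) arr.length (p - 1) (by omega) (by omega)
    have hrr : pvGet (pvRrise arr) (p + 1) = pvARight arr (arr.length : Int) (p + 1) 0 := by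
      rw [pvRrise_eq]
      exact pvGet_map_range (fun t => pvARight arr (arr.length : Int) t 0) arr.length (p + 1) (by omega) (by omega)
    rw [pvBScan, List.filter_cons]
    by_cases hpk : pvGet arr p > pvGet arr (p - 1) ∧ pvGet arr p > pvGet arr (p + 1)
    · rw [if_pos (decide_eq_true hpk), pvAScan]
      by_cases hc : pvALeft arr (p - 1) 0 ≥ 2 ∧ pvARight arr (arr.length : Int) (p + 1) 0 ≥ 2
      · rw [if_pos hc,
          if_pos (show pvGet arr p > pvGet arr (p - 1) ∧ pvGet arr p > pvGet arr (p + 1)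
              ∧ pvGet (pvLdesc arr) (p - 1) ≥ 2 ∧ pvGet (pvRrise arr) (p + 1) ≥ 2 from
            ⟨hpk.1, hpk.2, by rw [hld]; exact hc.1, by rw [hrr]; exact hc.2⟩)]
      · rw [if_neg (show ¬(pvGet arr p > pvGet arr (p - 1) ∧ pvGet arr p > pvGet arr (p + 1)
              ∧ pvGet (pvLdesc arr) (p - 1) ≥ 2 ∧ pvGet (pvRrise arr) (p + 1) ≥ 2) from
            fun hfull => hc ⟨by rw [← hld]; exact hfull.2.2.1, by rw [← hrr]; exact hfull.2.2.2⟩),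
          if_neg hc]
        exact ih hrest
    · rw [if_neg (show ¬(pvGet arr p > pvGet arr (p - 1) ∧ pvGet arr p > pvGet arr (p + 1)
              ∧ pvGet (pvLdesc arr) (p - 1) ≥ 2 ∧ pvGet (pvRrise arr) (p + 1) ≥ 2) from
            fun hfull => hpk ⟨hfull.1, hfull.2.1⟩),
          if_neg (by simpa using hpk)]
      exact ih hrest

-- ===== VERDICT (by name: the statement is the Claim_ definition above) =====
theorem find_highest_peak_spec : Claim_equal_find_highest_peak := by
  intro arr _
  unfold Spec_find_highest_peak find_highest_peak find_highest_peak_alt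
  simp only []
  rw [PySem.List.foldl_append_ite_eq_filter]
  rw [pvScan_eq arr _ (by intro p hp; have := (PySem.List.mem_pyRange_one).1 hp; omega)]
  simp
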